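-- pv_equiv track=rewrite | github.com/john-bankert/aif-django | aif_campaign/functions.py | lod
-- ===== SOURCE A (Python) =====
-- def lod(roll):
--     if roll < 8:
--         return 0
--     else:
--         i = 1
--         while roll >= (8 + (i * 3)):
--             i += 1
--         return i
-- ===== SOURCE B (Python) =====
-- def lod(roll):
--     if roll < 8:
--         return 0
--     return (roll - 8) // 3 + 1
-- ===== Notes on version B (the rewrite author's own statement) =====
-- stated objective: faster
-- what changed: Replaced the counting while-loop with a closed-form quotient formula computing the step index directly.
import Mathlib
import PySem

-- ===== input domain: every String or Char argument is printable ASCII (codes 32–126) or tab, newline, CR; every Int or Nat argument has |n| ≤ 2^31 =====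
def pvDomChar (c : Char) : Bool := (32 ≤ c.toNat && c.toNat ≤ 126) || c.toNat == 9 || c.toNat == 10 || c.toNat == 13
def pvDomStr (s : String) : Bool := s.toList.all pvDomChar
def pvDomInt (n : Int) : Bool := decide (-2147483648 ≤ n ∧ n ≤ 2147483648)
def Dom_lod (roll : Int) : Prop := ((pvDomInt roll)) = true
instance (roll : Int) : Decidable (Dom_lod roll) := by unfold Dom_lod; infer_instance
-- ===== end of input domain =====

-- B replaces A's counting while-loop by the closed form (roll-8)//3 + 1 (O(1) vs O(roll)).

-- ===== PORT A =====
-- the while-loop of A: i increments while roll >= 8 + i*3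
def lodLoop (roll i : Int) : Int :=
  if roll ≥ 8 + i * 3 then lodLoop roll (i + 1) else i
termination_by (roll - i * 3).toNat
decreasing_by omega

def lod (roll : Int) : Int :=
  if roll < 8 then 0 else lodLoop roll 1

-- ===== PORT B =====
def lod_alt (roll : Int) : Int :=
  if roll < 8 then 0 else PySem.Int.floordiv (roll - 8) 3 + 1

-- ===== PRECONDITION & SPEC =====
def Spec_lod (roll : Int) (out : Int) : Prop := out = lod_alt roll
instance (roll : Int) (out : Int) : Decidable (Spec_lod roll out) := by unfold Spec_lod; infer_instance

-- ===== CLAIM (what is proved, stated in full; the proofs are below) =====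
def Claim_equal_lod : Prop := ∀ (roll : Int), Dom_lod roll → Spec_lod roll (lod roll)

-- ===== LEMMAS AND PROOFS =====
-- loop invariant: starting at i with 8 + (i-1)*3 ≤ roll, the loop returns (roll-8)//3 + 1
theorem lodLoop_eq (roll i : Int) (h : 8 + (i - 1) * 3 ≤ roll) :
    lodLoop roll i = PySem.Int.floordiv (roll - 8) 3 + 1 := by
  rw [lodLoop]
  split_ifs with hc
  · exact lodLoop_eq roll (i + 1) (by omega)
  · have h3 : (0:Int) < 3 := by omega
    rw [PySem.Int.floordiv_eq_ediv_of_pos h3]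
    omega
termination_by (roll - i * 3).toNat
decreasing_by omega

-- ===== VERDICT (by name: the statement is the Claim_ definition above) =====
theorem lod_spec : Claim_equal_lod := by
  intro roll _
  unfold Spec_lod lod lod_alt
  split_ifs with h
  · rfl
  · exact lodLoop_eq roll 1 (by omega)
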